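-- pv_equiv track=rewrite | github.com/TheUltimateAbsol/emulatorcursor | validate_draw.py | choose_next_contour_edge
-- ===== SOURCE A (Python) =====
-- def direction_code(dx: int, dy: int) -> int:
--     if dx == 1 and dy == 0:
--         return 0
--     if dx == 0 and dy == 1:
--         return 1
--     if dx == -1 and dy == 0:
--         return 2
--     return 3
--
-- def choose_next_contour_edge(current_edge: dict, candidates: list[int], edges: list[dict]) -> int:
--     if len(candidates) == 1:
--         return candidates[0]
--     current_direction = direction_code(
--         current_edge["endX"] - current_edge["startX"],
--         current_edge["endY"] - current_edge["startY"],
--     )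
--     turn_preference = [1, 0, 3, 2]
--     best_index = candidates[0]
--     best_score = float("inf")
--     for candidate_index in candidates:
--         candidate = edges[candidate_index]
--         candidate_direction = direction_code(
--             candidate["endX"] - candidate["startX"],
--             candidate["endY"] - candidate["startY"],
--         )
--         delta = (candidate_direction - current_direction + 4) % 4
--         score = turn_preference.index(delta)
--         if score < best_score:
--             best_score = score
--             best_index = candidate_index
--     return best_index
-- ===== SOURCE B (Python) =====
-- def direction_code(dx: int, dy: int) -> int:
--     if dx == 1 and dy == 0:
--         return 0
--     if dx == 0 and dy == 1:
--         return 1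
--     if dx == -1 and dy == 0:
--         return 2
--     return 3
--
-- def choose_next_contour_edge(current_edge: dict, candidates: list[int], edges: list[dict]) -> int:
--     if len(candidates) == 1:
--         return candidates[0]
--     current_direction = direction_code(
--         current_edge["endX"] - current_edge["startX"],
--         current_edge["endY"] - current_edge["startY"],
--     )
--     for preferred_delta in (1, 0, 3, 2):
--         for candidate_index in candidates:
--             candidate = edges[candidate_index]
--             candidate_direction = direction_code(
--                 candidate["endX"] - candidate["startX"],
--                 candidate["endY"] - candidate["startY"],
--             )
--             if (candidate_direction - current_direction + 4) % 4 == preferred_delta: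
--                 return candidate_index
--     return candidates[0]
-- ===== Notes on version B (the rewrite author's own statement) =====
-- stated objective: alternative
-- what changed: Replaces the single-pass best-score-tracking fold (score = position of the turn delta in the preference table, strict-improvement argmin) with a preference-ordered multi-pass search: for each delta in [1,0,3,2] scan the candidates in order and return the first whose turn delta matches.
import Mathlib
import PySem

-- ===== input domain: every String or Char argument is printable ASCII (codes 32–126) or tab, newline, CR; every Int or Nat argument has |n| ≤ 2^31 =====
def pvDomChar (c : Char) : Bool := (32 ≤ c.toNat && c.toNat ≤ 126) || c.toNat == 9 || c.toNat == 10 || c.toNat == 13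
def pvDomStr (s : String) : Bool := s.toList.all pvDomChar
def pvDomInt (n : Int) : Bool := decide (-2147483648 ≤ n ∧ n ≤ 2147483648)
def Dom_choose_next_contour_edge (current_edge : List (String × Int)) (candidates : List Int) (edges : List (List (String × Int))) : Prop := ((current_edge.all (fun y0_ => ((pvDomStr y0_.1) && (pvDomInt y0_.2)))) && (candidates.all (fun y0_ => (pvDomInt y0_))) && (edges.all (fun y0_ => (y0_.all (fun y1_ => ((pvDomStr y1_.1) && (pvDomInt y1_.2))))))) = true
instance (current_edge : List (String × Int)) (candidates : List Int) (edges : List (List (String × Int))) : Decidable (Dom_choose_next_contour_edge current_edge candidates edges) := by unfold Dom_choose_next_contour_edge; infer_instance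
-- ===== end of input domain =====

-- B replaces A's single-pass best-score-tracking fold by a preference-ordered multi-pass
-- search (for each turn delta in [1,0,3,2], first matching candidate); same return value.

-- ===== PORT A =====
-- shared helper: the module's direction_code, used verbatim by both Pythons
def direction_code (dx : Int) (dy : Int) : Int :=
  if dx = 1 ∧ dy = 0 then 0
  else if dx = 0 ∧ dy = 1 then 1
  else if dx = -1 ∧ dy = 0 then 2
  else 3

-- d[k]: total stand-in for the dict lookup; exact when k is present (required by Pre_)
def pvGetKey (d : List (String × Int)) (k : String) : Int := PySem.Dict.getD ⟨d⟩ k 0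

-- direction_code(e["endX"]-e["startX"], e["endY"]-e["startY"]) — both Pythons compute exactly this
def pvDir (d : List (String × Int)) : Int :=
  direction_code (pvGetKey d "endX" - pvGetKey d "startX") (pvGetKey d "endY" - pvGetKey d "startY")

-- (direction_code(edges[c]) - current_direction + 4) % 4 — computed by both Pythons per candidate;
-- edges[c] via pyGet? with a [] default, exact when c is in range (required by Pre_)
def pvDelta (edges : List (List (String × Int))) (cur : Int) (c : Int) : Int :=
  PySem.Int.mod (pvDir ((PySem.List.pyGet? edges c).getD []) - cur + 4) 4

-- A: best_score starts at float("inf"); every score is ≤ 3, so 4 is an exact stand-in for inf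
def choose_next_contour_edge (current_edge : List (String × Int)) (candidates : List Int) (edges : List (List (String × Int))) : Int :=
  if candidates.length = 1 then candidates.headD 0
  else
    let cur := pvDir current_edge
    let tp : List Int := [1, 0, 3, 2]
    (candidates.foldl (fun b c =>
        let delta := pvDelta edges cur c
        let score : Int := (((PySem.List.index? tp delta).getD 0 : Nat) : Int)
        if score < b.2 then (c, score) else b)
      (candidates.headD 0, (4 : Int))).1

-- ===== PORT B =====
-- B: for each preferred delta, return the first candidate realising it
def prefLoop (cands : List Int) (p : Int → Int) : List Int → Option Int
  | [] => none
  | d :: ds =>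
    match cands.find? (fun c => p c == d) with
    | some c => some c
    | none => prefLoop cands p ds

def choose_next_contour_edge_alt (current_edge : List (String × Int)) (candidates : List Int) (edges : List (List (String × Int))) : Int :=
  if candidates.length = 1 then candidates.headD 0
  else
    let cur := pvDir current_edge
    (prefLoop candidates (pvDelta edges cur) [1, 0, 3, 2]).getD (candidates.headD 0)

-- ===== PRECONDITION & SPEC =====
def pvKeys (d : List (String × Int)) : Bool :=
  PySem.Dict.contains ⟨d⟩ "endX" && PySem.Dict.contains ⟨d⟩ "startX" &&
  PySem.Dict.contains ⟨d⟩ "endY" && PySem.Dict.contains ⟨d⟩ "startY"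

-- exactly where Python A returns: candidates nonempty (else IndexError/KeyError), and unless the
-- length-1 shortcut fires, all four keys present and every candidate index in range with its edge keyed
def Pre_choose_next_contour_edge (current_edge : List (String × Int)) (candidates : List Int) (edges : List (List (String × Int))) : Prop :=
  candidates ≠ [] ∧
  (candidates.length ≠ 1 →
    pvKeys current_edge = true ∧
    ∀ c ∈ candidates, PySem.Raise.InRange edges.length c ∧
      pvKeys ((PySem.List.pyGet? edges c).getD []) = true)
instance (current_edge : List (String × Int)) (candidates : List Int) (edges : List (List (String × Int))) : Decidable (Pre_choose_next_contour_edge current_edge candidates edges) := by unfold Pre_choose_next_contour_edge; infer_instance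

def pvWitness_choose_next_contour_edge : (List (String × Int)) × List Int × (List (List (String × Int))) :=
  ([("startX", 0), ("startY", 0), ("endX", 1), ("endY", 0)], [0, 1],
   [[("startX", 1), ("startY", 0), ("endX", 1), ("endY", 1)],
    [("startX", 1), ("startY", 0), ("endX", 2), ("endY", 0)]])

def Spec_choose_next_contour_edge (current_edge : List (String × Int)) (candidates : List Int) (edges : List (List (String × Int))) (out : Int) : Prop := out = choose_next_contour_edge_alt current_edge candidates edges
instance (current_edge : List (String × Int)) (candidates : List Int) (edges : List (List (String × Int))) (out : Int) : Decidable (Spec_choose_next_contour_edge current_edge candidates edges out) := by unfold Spec_choose_next_contour_edge; infer_instance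

-- ===== CLAIM (what is proved, stated in full; the proofs are below) =====
def Claim_equal_choose_next_contour_edge : Prop := ∀ (current_edge : List (String × Int)) (candidates : List Int) (edges : List (List (String × Int))), Dom_choose_next_contour_edge current_edge candidates edges → Pre_choose_next_contour_edge current_edge candidates edges → Spec_choose_next_contour_edge current_edge candidates edges (choose_next_contour_edge current_edge candidates edges)

-- ===== LEMMAS AND PROOFS =====

-- A's loop body, abstracted over the score function
def pvStep (f : Int → Int) (b : Int × Int) (c : Int) : Int × Int :=
  if f c < b.2 then (c, f c) else b

-- running minimum of the scores, seeded with s0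
def pvMin (f : Int → Int) (l : List Int) (s0 : Int) : Int :=
  l.foldl (fun a c => min a (f c)) s0

theorem pvMin_le_init (f : Int → Int) (l : List Int) (s0 : Int) : pvMin f l s0 ≤ s0 := by
  induction l generalizing s0 with
  | nil => simp [pvMin]
  | cons c cs ih =>
    have h := ih (min s0 (f c))
    simp [pvMin, List.foldl_cons] at h ⊢
    omega

theorem pvMin_le_elem (f : Int → Int) (l : List Int) (s0 : Int) :
    ∀ x ∈ l, pvMin f l s0 ≤ f x := by
  induction l generalizing s0 with
  | nil => simp
  | cons c cs ih =>
    intro x hx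
    rcases List.mem_cons.mp hx with h | h
    · subst h
      have h2 := pvMin_le_init f cs (min s0 (f x))
      simp [pvMin, List.foldl_cons] at h2 ⊢
      omega
    · have h3 := ih (min s0 (f c)) x h
      simpa [pvMin, List.foldl_cons] using h3

theorem pvMin_attained (f : Int → Int) (l : List Int) (s0 : Int) :
    pvMin f l s0 = s0 ∨ ∃ x ∈ l, f x = pvMin f l s0 := by
  induction l generalizing s0 with
  | nil => left; rfl
  | cons c cs ih =>
    have hM : pvMin f (c :: cs) s0 = pvMin f cs (min s0 (f c)) := rfl
    rcases ih (min s0 (f c)) with h | ⟨x, hx, hfx⟩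
    · by_cases hle : s0 ≤ f c
      · left; rw [hM, h]; omega
      · right; exact ⟨c, List.mem_cons_self, by rw [hM, h]; omega⟩
    · right; exact ⟨x, List.mem_cons_of_mem _ hx, by rw [hM]; exact hfx⟩

theorem pvMin_lb (f : Int → Int) (l : List Int) : ∀ (s0 b : Int),
    (∀ x ∈ l, b ≤ f x) → b ≤ s0 → b ≤ pvMin f l s0 := by
  induction l with
  | nil => intro s0 b _ hs; simpa [pvMin]
  | cons c cs ih =>
    intro s0 b hb hs
    have := hb c List.mem_cons_self
    exact ih (min s0 (f c)) b (fun x hx => hb x (List.mem_cons_of_mem _ hx)) (by omega)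

-- characterisation of A's fold: first candidate attaining the running minimum strictly below the seed
theorem fold_char (f : Int → Int) (l : List Int) (b0 s0 : Int) :
    (l.foldl (pvStep f) (b0, s0)).1 =
      (l.find? (fun c => decide (f c < s0) && (f c == pvMin f l s0))).getD b0 := by
  induction l generalizing b0 s0 with
  | nil => simp
  | cons c cs ih =>
    have hM : pvMin f (c :: cs) s0 = pvMin f cs (min s0 (f c)) := rfl
    by_cases h : f c < s0
    · have hstep : pvStep f (b0, s0) c = (c, f c) := by simp [pvStep, h]
      have hmin : min s0 (f c) = f c := by omega
      rw [List.foldl_cons, hstep, ih]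
      by_cases hm : pvMin f cs (f c) = f c
      · -- c itself attains the minimum: find? stops at c, the tail find? is empty
        have hpc : (decide (f c < s0) && (f c == pvMin f (c :: cs) s0)) = true := by
          simp [hM, hmin, hm, h]
        rw [List.find?_cons, hpc]
        have hnone : cs.find? (fun x => decide (f x < f c) && (f x == pvMin f cs (f c))) = none := by
          rw [List.find?_eq_none]
          intro x _
          simp [hm]
          omega
        simp [hnone]
      · -- the minimum is attained strictly later: both find?s agree
        have hlt : pvMin f cs (f c) < f c := by
          have := pvMin_le_init f cs (f c); omega
        have hpc : (decide (f c < s0) && (f c == pvMin f (c :: cs) s0)) = false := by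
          simp [hM, hmin]
          intro _
          omega
        rw [List.find?_cons, hpc]
        have hpred : (fun x => decide (f x < s0) && (f x == pvMin f (c :: cs) s0)) =
            (fun x => decide (f x < f c) && (f x == pvMin f cs (f c))) := by
          funext x
          by_cases hx : f x = pvMin f cs (f c)
          · simp [hM, hmin, hx]; omega
          · have hfalse : (f x == pvMin f cs (f c)) = false := by simp [hx]
            simp [hM, hmin, hfalse]
        rw [hpred]
        rcases pvMin_attained f cs (f c) with hA | ⟨x, hx, hfx⟩
        · omega
        · have hsome : (cs.find? (fun x => decide (f x < f c) && (f x == pvMin f cs (f c)))).isSome := by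
            rw [List.find?_isSome]
            exact ⟨x, hx, by simp [hfx, hlt]⟩
          obtain ⟨y, hy⟩ := Option.isSome_iff_exists.mp hsome
          simp [hy]
    · have hstep : pvStep f (b0, s0) c = (b0, s0) := by simp [pvStep, h]
      have hmin : min s0 (f c) = s0 := by omega
      have hpc : (decide (f c < s0) && (f c == pvMin f (c :: cs) s0)) = false := by
        simp; intro hc; omega
      rw [List.foldl_cons, hstep, ih, List.find?_cons, hpc, hM, hmin]

-- the score A computes from a delta in [0,4): position in the preference table [1,0,3,2]
theorem score_of_delta (δ : Int) (h0 : 0 ≤ δ) (h4 : δ < 4) :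
    (((PySem.List.index? ([1, 0, 3, 2] : List Int) δ).getD 0 : Nat) : Int) =
      (if δ = 1 then 0 else if δ = 0 then 1 else if δ = 3 then 2 else 3) := by
  have : δ = 0 ∨ δ = 1 ∨ δ = 2 ∨ δ = 3 := by omega
  rcases this with h | h | h | h <;> subst h <;> decide

theorem choose_next_contour_edge_eq (current_edge : List (String × Int)) (candidates : List Int)
    (edges : List (List (String × Int))) (hne : candidates ≠ []) :
    choose_next_contour_edge current_edge candidates edges =
      choose_next_contour_edge_alt current_edge candidates edges := by
  by_cases h1 : candidates.length = 1
  · simp [choose_next_contour_edge, choose_next_contour_edge_alt, h1]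
  · set cur := pvDir current_edge with hcur
    set f : Int → Int := fun c =>
      (((PySem.List.index? ([1, 0, 3, 2] : List Int) (pvDelta edges cur c)).getD 0 : Nat) : Int)
      with hf
    set b0 : Int := candidates.headD 0 with hb0
    -- both sides, unfolded
    have hA : choose_next_contour_edge current_edge candidates edges =
        (candidates.foldl (pvStep f) (b0, 4)).1 := by
      simp only [choose_next_contour_edge, if_neg h1]
      rfl
    have hB : choose_next_contour_edge_alt current_edge candidates edges =
        (prefLoop candidates (pvDelta edges cur) [1, 0, 3, 2]).getD b0 := by
      simp only [choose_next_contour_edge_alt, if_neg h1]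
      rfl
    -- score facts
    have hdelta : ∀ c, 0 ≤ pvDelta edges cur c ∧ pvDelta edges cur c < 4 := by
      intro c
      exact ⟨PySem.Int.mod_nonneg _ (by norm_num), PySem.Int.mod_lt _ (by norm_num)⟩
    have hfval : ∀ c, f c = (if pvDelta edges cur c = 1 then 0 else
        if pvDelta edges cur c = 0 then 1 else if pvDelta edges cur c = 3 then 2 else 3) := by
      intro c
      exact score_of_delta _ (hdelta c).1 (hdelta c).2
    have hfbound : ∀ c, 0 ≤ f c ∧ f c ≤ 3 := by
      intro c; rw [hfval c]; split_ifs <;> omega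
    -- the per-level predicates B scans with, expressed through f
    have hp : ∀ (d s : Int),
        (d = 1 ∧ s = 0) ∨ (d = 0 ∧ s = 1) ∨ (d = 3 ∧ s = 2) ∨ (d = 2 ∧ s = 3) →
        (fun c => pvDelta edges cur c == d) = (fun c => f c == s) := by
      intro d s hds
      funext c
      have hc := hfval c
      have hb := hdelta c
      rcases hds with ⟨hd, hs⟩ | ⟨hd, hs⟩ | ⟨hd, hs⟩ | ⟨hd, hs⟩ <;> subst hd <;> subst hs <;>
        · simp only [hc]
          split_ifs <;> simp <;> omega
    -- A as a find? over the minimum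
    set M : Int := pvMin f candidates 4 with hMdef
    have hAfind : choose_next_contour_edge current_edge candidates edges =
        (candidates.find? (fun c => f c == M)).getD b0 := by
      have hpred4 : (fun c => decide (f c < 4) && (f c == pvMin f candidates 4)) =
          (fun c => f c == M) := by
        funext c
        have hb4 := (hfbound c).2
        have ht : (decide (f c < 4)) = true := by simp; omega
        rw [ht, Bool.true_and, hMdef]
      rw [hA, fold_char, hpred4]
    -- M is one of 0,1,2,3 and is attained
    have hub : M ≤ 3 := by
      obtain ⟨c, cs, rfl⟩ := List.exists_cons_of_ne_nil hne
      have := pvMin_le_elem f (c :: cs) 4 c List.mem_cons_self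
      have := (hfbound c).2
      omega
    have hlbM : 0 ≤ M := pvMin_lb f candidates 4 0 (fun x _ => (hfbound x).1) (by norm_num)
    have hattain : ∃ x ∈ candidates, f x = M := by
      rcases pvMin_attained f candidates 4 with h | h
      · omega
      · exact h
    have hlev : ∀ s : Int, s < M → candidates.find? (fun c => f c == s) = none := by
      intro s hs
      rw [List.find?_eq_none]
      intro x hx
      have := pvMin_le_elem f candidates 4 x hx
      simp
      omega
    -- B's chain, rewritten level by level
    rw [hAfind, hB]
    simp only [prefLoop,
      hp 1 0 (by tauto), hp 0 1 (by tauto), hp 3 2 (by tauto), hp 2 3 (by tauto)]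
    obtain ⟨x, hx, hfx⟩ := hattain
    have hsome : (candidates.find? (fun c => f c == M)).isSome := by
      rw [List.find?_isSome]; exact ⟨x, hx, by simp [hfx]⟩
    obtain ⟨y, hy⟩ := Option.isSome_iff_exists.mp hsome
    have hM4 : M = 0 ∨ M = 1 ∨ M = 2 ∨ M = 3 := by omega
    rcases hM4 with h | h | h | h <;> rw [h] at hy ⊢
    · simp [hy]
    · simp [hlev 0 (by omega), hy]
    · simp [hlev 0 (by omega), hlev 1 (by omega), hy]
    · simp [hlev 0 (by omega), hlev 1 (by omega), hlev 2 (by omega), hy]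

-- ===== VERDICT (by name: the statement is the Claim_ definition above) =====
theorem choose_next_contour_edge_spec : Claim_equal_choose_next_contour_edge := by
  intro current_edge candidates edges _ hpre
  unfold Spec_choose_next_contour_edge
  exact choose_next_contour_edge_eq current_edge candidates edges hpre.1
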